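-- pv_equiv track=rewrite | github.com/chakospe/EPIJudge | epi_judge_python/snake_string.py | snake_string
-- ===== SOURCE A (Python) =====
-- def snake_string(s: str) -> str:
--     top, middle, bottom = [], [], []
--     which = 'mt'
--     for i in s:
--         if which[0] == 'm':
--             middle.append(i)
--             which = which[1]
--         elif which == 't':
--             top.append(i)
--             which = 'mb'
--         else:
--             bottom.append(i)
--             which = 'mt'
--     return ''.join([''.join(top), ''.join(middle), ''.join(bottom)])
-- ===== SOURCE B (Python) =====
-- def snake_string(s: str) -> str:
--     top = ''.join(c for i, c in enumerate(s) if i % 4 == 1)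
--     middle = ''.join(c for i, c in enumerate(s) if i % 2 == 0)
--     bottom = ''.join(c for i, c in enumerate(s) if i % 4 == 3)
--     return top + middle + bottom
-- ===== Notes on version B (the rewrite author's own statement) =====
-- stated objective: simpler
-- what changed: Replaces the single pass threading a three-valued state cursor through three growing buckets with three independent index-residue filters (i%4==1, i%2==0, i%4==3) over enumerate(s), concatenated directly.
import Mathlib
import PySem

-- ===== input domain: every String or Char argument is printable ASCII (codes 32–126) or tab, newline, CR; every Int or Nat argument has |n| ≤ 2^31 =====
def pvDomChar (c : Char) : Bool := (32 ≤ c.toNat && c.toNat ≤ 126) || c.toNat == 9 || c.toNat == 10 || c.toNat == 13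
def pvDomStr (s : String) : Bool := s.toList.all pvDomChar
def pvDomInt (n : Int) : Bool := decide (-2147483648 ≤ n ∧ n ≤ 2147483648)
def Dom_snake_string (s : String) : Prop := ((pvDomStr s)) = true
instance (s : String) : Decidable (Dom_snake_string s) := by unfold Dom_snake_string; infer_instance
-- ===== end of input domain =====

-- B replaces A's single-pass state-machine loop with three independent
-- index-residue filters over enumerate(s) (i%4==1, i%2==0, i%4==3), concatenated.


-- ===== PORT A =====
-- the loop over s with the three buckets and the 'which' cursor; 'which = which[1]'
-- is ported exactly (string indexing via PySem.Str.pyGet?, the none case unreachable)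
def snakeLoop (cs : List Char) (top middle bottom : List Char) (which : String) :
    List Char × List Char × List Char :=
  match cs with
  | [] => (top, middle, bottom)
  | c :: rest =>
    if PySem.Str.pyGet? which 0 == some 'm' then
      snakeLoop rest top (middle ++ [c]) bottom
        (match PySem.Str.pyGet? which 1 with
         | some ch => String.mk [ch]
         | none => "")
    else if which == "t" then
      snakeLoop rest (top ++ [c]) middle bottom "mb"
    else
      snakeLoop rest top middle (bottom ++ [c]) "mt"

def snake_string (s : String) : String :=
  match snakeLoop s.toList [] [] [] "mt" with
  | (top, middle, bottom) => String.mk (top ++ middle ++ bottom)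

-- ===== PORT B =====
def snake_string_alt (s : String) : String :=
  let e := PySem.List.enumerate s.toList 0
  let top := (e.filter (fun p => PySem.Int.mod p.1 4 == 1)).map Prod.snd
  let middle := (e.filter (fun p => PySem.Int.mod p.1 2 == 0)).map Prod.snd
  let bottom := (e.filter (fun p => PySem.Int.mod p.1 4 == 3)).map Prod.snd
  String.mk (top ++ middle ++ bottom)

-- ===== PRECONDITION & SPEC =====
def Spec_snake_string (s : String) (out : String) : Prop := out = snake_string_alt s
instance (s : String) (out : String) : Decidable (Spec_snake_string s out) := by unfold Spec_snake_string; infer_instance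

-- ===== CLAIM (what is proved, stated in full; the proofs are below) =====
def Claim_equal_snake_string : Prop := ∀ (s : String), Dom_snake_string s → Spec_snake_string s (snake_string s)

-- ===== LEMMAS AND PROOFS =====

def snakeState (r : Nat) : String :=
  if r = 0 then "mt" else if r = 1 then "t" else if r = 2 then "mb" else "b"

def bucket (r q : Int) (cs : List Char) (n : Int) : List Char :=
  ((PySem.List.enumerate cs n).filter (fun p => PySem.Int.mod p.1 q == r)).map Prod.snd

lemma fmod_cast (n : Nat) (q : Nat) (hq : 0 < q) : PySem.Int.mod (n : Int) q = ((n % q : Nat) : Int) := by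
  unfold PySem.Int.mod
  rw [Int.fmod_eq_emod]
  omega

lemma bucket_cons (r q : Int) (c : Char) (cs : List Char) (n : Int) :
    bucket r q (c :: cs) n =
      (if PySem.Int.mod n q == r then [c] else []) ++ bucket r q cs (n + 1) := by
  simp [bucket, PySem.List.enumerate_cons]
  split <;> simp_all

lemma ev_mt0 : (PySem.Str.pyGet? "mt" 0 == some 'm') = true := by decide
lemma ev_mt1 : PySem.Str.pyGet? "mt" 1 = some 't' := by decide
lemma ev_t0 : (PySem.Str.pyGet? "t" 0 == some 'm') = false := by decide
lemma ev_tt : (("t" : String) == "t") = true := by decide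
lemma ev_mb0 : (PySem.Str.pyGet? "mb" 0 == some 'm') = true := by decide
lemma ev_mb1 : PySem.Str.pyGet? "mb" 1 = some 'b' := by decide
lemma ev_b0 : (PySem.Str.pyGet? "b" 0 == some 'm') = false := by decide
lemma ev_bt : (("b" : String) == "t") = false := by decide

lemma snakeLoop_key (cs : List Char) : ∀ (n : Nat) (t m b : List Char),
    snakeLoop cs t m b (snakeState (n % 4)) =
      (t ++ bucket 1 4 cs (n : Int), m ++ bucket 0 2 cs (n : Int), b ++ bucket 3 4 cs (n : Int)) := by
  induction cs with
  | nil => intro n t m b; simp [snakeLoop, bucket, PySem.List.enumerate_nil]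
  | cons c rest ih =>
    intro n t m b
    have h4 : n % 4 = 0 ∨ n % 4 = 1 ∨ n % 4 = 2 ∨ n % 4 = 3 := by omega
    have e1 : PySem.Int.mod (n : Int) 4 = ((n % 4 : Nat) : Int) := fmod_cast n 4 (by norm_num)
    have e2 : PySem.Int.mod (n : Int) 2 = ((n % 2 : Nat) : Int) := fmod_cast n 2 (by norm_num)
    have hs : ((n : Int) + 1) = ((n + 1 : Nat) : Int) := by push_cast; ring
    rcases h4 with h | h | h | h
    · have h2 : n % 2 = 0 := by omega
      have hn : (n + 1) % 4 = 1 := by omega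
      have st : snakeState ((n + 1) % 4) = "t" := by rw [hn]; rfl
      rw [bucket_cons, bucket_cons, bucket_cons, e1, e2, h, h2, hs]
      norm_num [snakeState]
      simp only [snakeLoop, ev_mt0, ev_mt1, if_true]
      rw [show String.mk ['t'] = "t" from rfl, ← st, ih]
      norm_num [List.append_assoc]
    · have h2 : n % 2 = 1 := by omega
      have hn : (n + 1) % 4 = 2 := by omega
      have st : snakeState ((n + 1) % 4) = "mb" := by rw [hn]; rfl
      rw [bucket_cons, bucket_cons, bucket_cons, e1, e2, h, h2, hs]
      norm_num [snakeState]
      simp only [snakeLoop, ev_t0, ev_tt, if_true, Bool.false_eq_true, if_false]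
      rw [← st, ih]
      norm_num [List.append_assoc]
    · have h2 : n % 2 = 0 := by omega
      have hn : (n + 1) % 4 = 3 := by omega
      have st : snakeState ((n + 1) % 4) = "b" := by rw [hn]; rfl
      rw [bucket_cons, bucket_cons, bucket_cons, e1, e2, h, h2, hs]
      norm_num [snakeState]
      simp only [snakeLoop, ev_mb0, ev_mb1, if_true]
      rw [show String.mk ['b'] = "b" from rfl, ← st, ih]
      norm_num [List.append_assoc]
    · have h2 : n % 2 = 1 := by omega
      have hn : (n + 1) % 4 = 0 := by omega
      have st : snakeState ((n + 1) % 4) = "mt" := by rw [hn]; rfl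
      rw [bucket_cons, bucket_cons, bucket_cons, e1, e2, h, h2, hs]
      norm_num [snakeState]
      simp only [snakeLoop, ev_b0, ev_bt, Bool.false_eq_true, if_false]
      rw [← st, ih]
      norm_num [List.append_assoc]

-- ===== VERDICT (by name: the statement is the Claim_ definition above) =====
theorem snake_string_spec : Claim_equal_snake_string := by
  intro s _
  show snake_string s = snake_string_alt s
  have h := snakeLoop_key s.toList 0 [] [] []
  norm_num [snakeState, Nat.cast_zero] at h
  simp [snake_string, snake_string_alt, bucket, h]
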